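-- pv_equiv track=rewrite | github.com/sckwokyboom/Java-Inline-LoRA | scripts/make_dataset.py | _window_search
-- ===== SOURCE A (Python) =====
-- from typing import Dict, Iterable, List, Optional, Sequence, Set, Tuple
--
-- def _line_equals(a: str, b: str) -> bool:
--     return a.rstrip("\r\n") == b.rstrip("\r\n")
--
-- def _window_search(lines: Sequence[str], base_idx: int, gt_nl_stripped: str, window: int) -> Optional[int]:
--     matches: List[int] = []
--     start = max(0, base_idx - window)
--     end = min(len(lines), base_idx + window + 1)
--     for i in range(start, end):
--         if _line_equals(lines[i], gt_nl_stripped):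
--             matches.append(i)
--     if not matches:
--         return None
--     matches.sort(key=lambda i: (abs(i - base_idx), i))
--     return matches[0]
-- ===== SOURCE B (Python) =====
-- def _window_search(lines, base_idx, gt_nl_stripped, window):
--     start = max(0, base_idx - window)
--     end = min(len(lines), base_idx + window + 1)
--     if start >= end:
--         return None
--     tgt = gt_nl_stripped.rstrip("\r\n")
--     p = min(max(base_idx, start), end - 1)
--     for d in range(end - start):
--         l = p - d
--         if l >= start and lines[l].rstrip("\r\n") == tgt:
--             return l
--         r = p + d
--         if d > 0 and r < end and lines[r].rstrip("\r\n") == tgt: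
--             return r
--     return None
-- ===== Notes on version B (the rewrite author's own statement) =====
-- stated objective: alternative
-- what changed: Instead of collecting all window matches, sorting them by (distance, index) and taking the head, B expands outward from the clamped pivot (left index before right at each distance), returning the first matching line, so no match list and no sort are built.
import Mathlib
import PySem

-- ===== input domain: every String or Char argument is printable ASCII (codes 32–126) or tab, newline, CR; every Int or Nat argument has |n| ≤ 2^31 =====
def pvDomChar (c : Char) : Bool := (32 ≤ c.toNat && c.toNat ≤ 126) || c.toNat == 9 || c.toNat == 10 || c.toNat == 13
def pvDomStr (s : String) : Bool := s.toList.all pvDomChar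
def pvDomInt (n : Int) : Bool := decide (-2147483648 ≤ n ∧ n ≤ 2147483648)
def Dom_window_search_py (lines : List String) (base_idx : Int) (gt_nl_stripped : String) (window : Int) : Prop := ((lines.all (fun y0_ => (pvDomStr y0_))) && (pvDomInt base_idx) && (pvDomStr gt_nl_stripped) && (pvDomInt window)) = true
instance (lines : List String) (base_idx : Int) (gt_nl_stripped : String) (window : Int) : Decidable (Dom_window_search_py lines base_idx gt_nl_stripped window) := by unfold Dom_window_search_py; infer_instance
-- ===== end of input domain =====

-- B replaces A's collect-sort-head over the window by an outward ring scan from the clamped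
-- pivot (left index before right at each distance), returning the first matching line: alternative decomposition.


-- ===== PORT A =====
-- s.rstrip("\r\n") on the code-point list (hand port: PySem has no chars-argument rstrip; exact on all inputs)
def pvRstripCRLF (cs : List Char) : List Char :=
  (cs.reverse.dropWhile (fun c => c == '\r' || c == '\n')).reverse

-- _line_equals(a, b)
def pvLineEquals (a b : String) : Bool := pvRstripCRLF a.toList == pvRstripCRLF b.toList

def window_search_py (lines : List String) (base_idx : Int) (gt_nl_stripped : String) (window : Int) : Option Int :=
  let start := max 0 (base_idx - window)
  let stop := min ((lines.length : Int)) (base_idx + window + 1)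
  -- for i in range(start, stop): collect i with _line_equals(lines[i], gt); lines[i] is in range here
  let ms := (PySem.List.pyRange start stop 1).foldl
      (fun acc i => if pvLineEquals (PySem.List.pyGetD lines i "") gt_nl_stripped then acc ++ [i] else acc) []
  if ms = [] then none
  else PySem.List.pyGet? (PySem.List.sorted2 ms (fun i => |i - base_idx|) (fun i => i) false) 0

-- ===== PORT B =====
-- the 'for d in range(stop - start)' loop of Source B; n counts remaining iterations, d the current distance
def pvWsLoop (lines : List String) (tgt : List Char) (s e p : Int) : Nat → Int → Option Int
  | 0, _ => none
  | n+1, d =>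
    if s ≤ p - d ∧ pvRstripCRLF (PySem.List.pyGetD lines (p - d) "").toList = tgt then some (p - d)
    else if 0 < d ∧ p + d < e ∧ pvRstripCRLF (PySem.List.pyGetD lines (p + d) "").toList = tgt then some (p + d)
    else pvWsLoop lines tgt s e p n (d+1)

def window_search_py_alt (lines : List String) (base_idx : Int) (gt_nl_stripped : String) (window : Int) : Option Int :=
  let start := max 0 (base_idx - window)
  let stop := min ((lines.length : Int)) (base_idx + window + 1)
  if stop ≤ start then none
  else
    let tgt := pvRstripCRLF gt_nl_stripped.toList
    let p := min (max base_idx start) (stop - 1)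
    pvWsLoop lines tgt start stop p (stop - start).toNat 0

-- ===== PRECONDITION & SPEC =====
def Spec_window_search_py (lines : List String) (base_idx : Int) (gt_nl_stripped : String) (window : Int) (out : Option Int) : Prop := out = window_search_py_alt lines base_idx gt_nl_stripped window
instance (lines : List String) (base_idx : Int) (gt_nl_stripped : String) (window : Int) (out : Option Int) : Decidable (Spec_window_search_py lines base_idx gt_nl_stripped window out) := by unfold Spec_window_search_py; infer_instance

-- ===== CLAIM (what is proved, stated in full; the proofs are below) =====
def Claim_equal_window_search_py : Prop := ∀ (lines : List String) (base_idx : Int) (gt_nl_stripped : String) (window : Int), Dom_window_search_py lines base_idx gt_nl_stripped window → Spec_window_search_py lines base_idx gt_nl_stripped window (window_search_py lines base_idx gt_nl_stripped window)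

-- ===== LEMMAS AND PROOFS =====

-- the list of indices B's loop visits, in visiting order
def pvRing (s e p : Int) : Nat → Int → List Int
  | 0, _ => []
  | n+1, d => (if s ≤ p - d then [p - d] else []) ++
      ((if 0 < d ∧ p + d < e then [p + d] else []) ++ pvRing s e p n (d+1))

-- strict "(abs-distance to b, index)" order, written with max so omega can reason about it
def pvKeyLt (b x y : Int) : Prop :=
  max (x - b) (b - x) < max (y - b) (b - y) ∨ (max (x - b) (b - x) = max (y - b) (b - y) ∧ x < y)

lemma pvAbs_eq_max (z b : Int) : |z - b| = max (z - b) (b - z) := by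
  rcases le_total (z - b) 0 with h | h
  · rw [abs_of_nonpos h]; omega
  · rw [abs_of_nonneg h]; omega

lemma pvKeyLt_iff_lex (b x y : Int) :
    pvKeyLt b x y ↔ (toLex (|x - b|, x) : Int ×ₗ Int) < toLex (|y - b|, y) := by
  rw [Prod.Lex.lt_iff]
  simp only [pvKeyLt, pvAbs_eq_max, ofLex_toLex]

lemma pvWsLoop_eq_find (lines : List String) (tgt : List Char) (s e p : Int) :
    ∀ (n : Nat) (d : Int), pvWsLoop lines tgt s e p n d =
      (pvRing s e p n d).find? (fun i => pvRstripCRLF (PySem.List.pyGetD lines i "").toList == tgt) := by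
  intro n
  induction n with
  | zero => intro d; simp [pvWsLoop, pvRing]
  | succ n ih =>
    intro d
    simp only [pvWsLoop, pvRing]
    by_cases h1 : s ≤ p - d <;>
      by_cases h2 : pvRstripCRLF (PySem.List.pyGetD lines (p - d) "").toList = tgt <;>
        by_cases h3 : 0 < d ∧ p + d < e <;>
          by_cases h4 : pvRstripCRLF (PySem.List.pyGetD lines (p + d) "").toList = tgt
    all_goals try (have h2b : (pvRstripCRLF (PySem.List.pyGetD lines (p - d) "").toList == tgt) = false :=
      beq_eq_false_iff_ne.2 (by assumption))
    all_goals try (have h4b : (pvRstripCRLF (PySem.List.pyGetD lines (p + d) "").toList == tgt) = false :=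
      beq_eq_false_iff_ne.2 (by assumption))
    all_goals simp [h1, h2, h3, h4, *, ih, List.find?, beq_iff_eq]

lemma pvMem_ring (s e p : Int) :
    ∀ (n : Nat) (d i : Int), 0 ≤ d →
      (i ∈ pvRing s e p n d ↔
        (s ≤ i ∧ d ≤ p - i ∧ p - i < d + n) ∨ (i < e ∧ 1 ≤ i - p ∧ d ≤ i - p ∧ i - p < d + n)) := by
  intro n
  induction n with
  | zero => intro d i hd; simp [pvRing]; try omega
  | succ n ih =>
    intro d i hd
    simp only [pvRing, List.mem_append]
    rw [ih (d+1) i (by omega)]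
    by_cases h1 : s ≤ p - d <;> by_cases h3 : 0 < d ∧ p + d < e <;>
      (simp [h1, h3]; try omega)

lemma pvRing_sorted (b s e p : Int) (hsp : s ≤ p) (hpe : p < e)
    (hL : s < p → p ≤ b) (hR : p + 1 < e → b ≤ p) :
    ∀ (n : Nat) (d : Int), 0 ≤ d →
      (∀ i ∈ pvRing s e p n d, max (p - b) (b - p) + d ≤ max (i - b) (b - i)) ∧
        (pvRing s e p n d).Pairwise (pvKeyLt b) := by
  intro n
  induction n with
  | zero => intro d hd; simp [pvRing]
  | succ n ih =>
    intro d hd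
    obtain ⟨ihb, ihp⟩ := ih (d+1) (by omega)
    have hld : s ≤ p - d → max (p - d - b) (b - (p - d)) = max (p - b) (b - p) + d := by
      intro h
      rcases eq_or_lt_of_le hd with h0 | h0
      · omega
      · have := hL (by omega); omega
    have hrd : 0 < d → p + d < e → max (p + d - b) (b - (p + d)) = max (p - b) (b - p) + d := by
      intro h1 h2
      have := hR (by omega); omega
    constructor
    · intro i hi
      simp only [pvRing, List.mem_append] at hi
      rcases hi with hi | hi | hi
      · rcases (by split_ifs at hi <;> simp_all : s ≤ p - d ∧ i = p - d) with ⟨hg, rfl⟩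
        rw [hld hg]
      · rcases (by split_ifs at hi <;> simp_all : (0 < d ∧ p + d < e) ∧ i = p + d) with ⟨hg, rfl⟩
        rw [hrd hg.1 hg.2]
      · have := ihb i hi; omega
    · simp only [pvRing]
      refine List.pairwise_append.2 ⟨?_, List.pairwise_append.2 ⟨?_, ihp, ?_⟩, ?_⟩
      · split_ifs <;> simp
      · split_ifs <;> simp
      · intro x hx y hy
        rcases (by split_ifs at hx <;> simp_all : (0 < d ∧ p + d < e) ∧ x = p + d) with ⟨hg, rfl⟩
        have := ihb y hy
        rw [pvKeyLt]; rw [hrd hg.1 hg.2]; omega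
      · intro x hx y hy
        rcases (by split_ifs at hx <;> simp_all : s ≤ p - d ∧ x = p - d) with ⟨hg, rfl⟩
        rw [pvKeyLt, hld hg]
        simp only [List.mem_append] at hy
        rcases hy with hy | hy
        · rcases (by split_ifs at hy <;> simp_all : (0 < d ∧ p + d < e) ∧ y = p + d) with ⟨hg2, rfl⟩
          rw [hrd hg2.1 hg2.2]; omega
        · have := ihb y hy; omega

lemma pvFind_min {P : Int → Bool} (b : Int) :
    ∀ {l : List Int} {r : Int}, l.Pairwise (pvKeyLt b) → l.find? P = some r →
      ∀ y ∈ l, P y = true → ¬ pvKeyLt b y r := by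
  intro l
  induction l with
  | nil => intro r _ h; simp at h
  | cons x t ih =>
    intro r hp hf y hy hPy
    rcases List.pairwise_cons.1 hp with ⟨hx, ht⟩
    by_cases hPx : P x = true
    · rw [List.find?_cons_of_pos hPx] at hf
      obtain rfl : x = r := by injection hf
      rcases List.mem_cons.1 hy with rfl | hy
      · rw [pvKeyLt]; omega
      · have := hx y hy; rw [pvKeyLt] at *; omega
    · rw [List.find?_cons_of_neg hPx] at hf
      rcases List.mem_cons.1 hy with rfl | hy
      · simp_all
      · exact ih ht hf y hy hPy

-- sorted2 with the (|i - b|, i) tuple key is sorted with the lexicographic key into Int ×ₗ Int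
lemma pvSorted2_eq_sorted_lex (xs : List Int) (b : Int) :
    PySem.List.sorted2 xs (fun i => |i - b|) (fun i => i) false =
      PySem.List.sorted xs (fun i => (toLex (|i - b|, i) : Int ×ₗ Int)) false := by
  rw [PySem.List.sorted_eq_foldl_insertBy]
  simp only [PySem.List.sorted2, Bool.false_eq_true, if_false]
  congr 1
  funext acc x
  congr 1
  funext u v
  rw [Bool.eq_iff_iff]
  simp only [Bool.or_eq_true, Bool.and_eq_true, Bool.not_eq_eq_eq_not, Bool.not_true,
    decide_eq_true_eq, decide_eq_false_iff_not, Prod.Lex.lt_iff, ofLex_toLex]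
  simp only [pvAbs_eq_max]
  omega

lemma pvMain (lines : List String) (base_idx : Int) (gt_nl_stripped : String) (window : Int) :
    window_search_py lines base_idx gt_nl_stripped window =
      window_search_py_alt lines base_idx gt_nl_stripped window := by
  simp only [window_search_py, window_search_py_alt]
  set s := max 0 (base_idx - window) with hs
  set e := min ((lines.length : Int)) (base_idx + window + 1) with he
  set P : Int → Bool := fun i => pvLineEquals (PySem.List.pyGetD lines i "") gt_nl_stripped with hP
  have hmatches : (PySem.List.pyRange s e 1).foldl
      (fun acc i => if pvLineEquals (PySem.List.pyGetD lines i "") gt_nl_stripped then acc ++ [i] else acc) []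
        = (PySem.List.pyRange s e 1).filter P := by
    simpa using PySem.List.foldl_append_if P id (PySem.List.pyRange s e 1) []
  rw [hmatches]
  by_cases hse : e ≤ s
  · rw [PySem.List.pyRange_one_eq_nil hse]
    simp [hse]
  · replace hse : s < e := by omega
    rw [if_neg (show ¬ (e ≤ s) by omega)]
    set p := min (max base_idx s) (e - 1) with hp
    have hsp : s ≤ p := by omega
    have hpe : p < e := by omega
    have hL : s < p → p ≤ base_idx := by omega
    have hR : p + 1 < e → base_idx ≤ p := by omega
    set n := (e - s).toNat with hn
    have hnn : (n : Int) = e - s := by omega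
    set R := pvRing s e p n 0 with hR0
    have hloop : pvWsLoop lines (pvRstripCRLF gt_nl_stripped.toList) s e p n 0 = R.find? P :=
      pvWsLoop_eq_find lines (pvRstripCRLF gt_nl_stripped.toList) s e p n 0
    have hmem : ∀ i : Int, i ∈ R ↔ s ≤ i ∧ i < e := by
      intro i
      rw [hR0, pvMem_ring s e p n 0 i le_rfl]
      omega
    obtain ⟨hbound, hpair⟩ := pvRing_sorted base_idx s e p hsp hpe hL hR n 0 le_rfl
    rw [hloop]
    set ms := (PySem.List.pyRange s e 1).filter P with hm
    have hmatch_mem : ∀ i : Int, i ∈ ms ↔ (s ≤ i ∧ i < e) ∧ P i = true := by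
      intro i
      rw [hm, List.mem_filter, PySem.List.mem_pyRange_one]
    by_cases hemp : ms = []
    · rw [if_pos hemp]
      symm
      rw [List.find?_eq_none]
      intro i hi
      have := (hmem i).1 hi
      intro hPi
      exact (List.ne_nil_of_mem ((hmatch_mem i).2 ⟨this, hPi⟩)) hemp
    · rw [if_neg hemp]
      rw [pvSorted2_eq_sorted_lex]
      set key : Int → Int ×ₗ Int := fun i => toLex (|i - base_idx|, i) with hkey
      obtain ⟨m, t, hsl⟩ : ∃ m t, PySem.List.sorted ms key false = m :: t := by
        rcases hsort : PySem.List.sorted ms key false with _ | ⟨m, t⟩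
        · exact absurd ((PySem.List.sorted_eq_nil_iff ms key false).1 hsort) hemp
        · exact ⟨m, t, rfl⟩
      rw [hsl]
      have hmmem : m ∈ ms :=
        (PySem.List.mem_sorted ms key false m).1 (hsl ▸ List.mem_cons_self)
      have hmmin : ∀ y ∈ ms, key m ≤ key y := PySem.List.key_head_sorted_le ms key hsl
      obtain ⟨⟨hms, hme⟩, hPm⟩ := (hmatch_mem m).1 hmmem
      -- B finds some r
      obtain ⟨r, hr⟩ : ∃ r, R.find? P = some r := by
        rcases hfind : R.find? P with _ | r
        · rw [List.find?_eq_none] at hfind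
          exact absurd hPm (hfind m ((hmem m).2 ⟨hms, hme⟩))
        · exact ⟨r, rfl⟩
      rw [hr]
      have hPr : P r = true := List.find?_some hr
      have hrR : r ∈ R := List.mem_of_find?_eq_some hr
      obtain ⟨hrs, hre⟩ := (hmem r).1 hrR
      have hrmatch : r ∈ ms := (hmatch_mem r).2 ⟨⟨hrs, hre⟩, hPr⟩
      have h1 : key m ≤ key r := hmmin r hrmatch
      have h2 : ¬ pvKeyLt base_idx m r :=
        pvFind_min base_idx hpair hr m ((hmem m).2 ⟨hms, hme⟩) hPm
      rw [pvKeyLt_iff_lex] at h2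
      have h3 : key r ≤ key m := not_lt.1 h2
      have : key m = key r := le_antisymm h1 h3
      have : m = r := by
        have := congrArg (fun x : Int ×ₗ Int => (ofLex x).2) this
        simpa [hkey] using this
      subst this
      simp [PySem.List.pyGet?, PySem.List.pyIdx?]

-- ===== VERDICT (by name: the statement is the Claim_ definition above) =====
theorem window_search_py_spec : Claim_equal_window_search_py := by
  intro lines base_idx gt_nl_stripped window _
  unfold Spec_window_search_py
  exact pvMain lines base_idx gt_nl_stripped window
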